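-- pv_equiv track=rewrite | github.com/exueyuanAlgorithm/AlgorithmDemo | LeetCode算法题/1048_最长字符串链/最长字符串链.py | check_word1_word2
-- ===== SOURCE A (Python) =====
-- def check_word1_word2(word1, word2):
--     lenth1 = len(word1)
--     lenth2 = len(word2)
--     if lenth2 - lenth1 != 1:
--         return False
--     i = 0
--     j = 0
--     is_different = False
--     while True:
--         if i >= len(word1):
--             return True
--         item1 = word1[i]
--         item2 = word2[j]
--         if item1 != item2:
--             if is_different:
--                 return False
--             else:
--                 is_different = True
--                 j += 1
--         else:
--             i += 1
--             j += 1
-- ===== SOURCE B (Python) =====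
-- def check_word1_word2(word1, word2):
--     n = len(word1)
--     if len(word2) - n != 1:
--         return False
--     p = 0
--     while p < n and word1[p] == word2[p]:
--         p += 1
--     s = 0
--     while s < n and word1[n - 1 - s] == word2[n - s]:
--         s += 1
--     return p + s >= n
-- ===== Notes on version B (the rewrite author's own statement) =====
-- stated objective: alternative
-- what changed: Replaced the single forward scan with a mismatch flag by two independent opposite-direction scans: a common-prefix count p and a common-suffix count s, returning p + s >= len(word1).
import Mathlib
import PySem

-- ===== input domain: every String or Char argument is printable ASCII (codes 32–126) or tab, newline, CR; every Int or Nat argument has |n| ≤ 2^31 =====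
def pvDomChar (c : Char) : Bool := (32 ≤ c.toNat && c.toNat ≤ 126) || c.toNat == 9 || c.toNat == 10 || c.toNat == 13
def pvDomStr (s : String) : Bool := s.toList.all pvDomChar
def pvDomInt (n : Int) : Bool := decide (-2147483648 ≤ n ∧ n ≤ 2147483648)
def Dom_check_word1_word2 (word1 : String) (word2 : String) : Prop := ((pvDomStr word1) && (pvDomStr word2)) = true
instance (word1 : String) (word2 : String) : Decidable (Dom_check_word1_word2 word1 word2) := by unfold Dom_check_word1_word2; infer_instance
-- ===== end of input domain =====

-- B replaces A's single forward scan with a mismatch flag by two independent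
-- opposite-direction scans (common-prefix count p, common-suffix count s) and returns
-- p + s >= len(word1); same O(n) cost, different decomposition (objective: alternative).

-- ===== PORT A =====
-- A's while-True loop: i indexes word1, j indexes word2, is_different the flag.
-- Python never raises here (j ≤ i + 1 < len(word2) whenever read), so the
-- unreachable none-branch of pyGet? returns false.
def loopA (w1 w2 : List Char) (i j : Nat) (flag : Bool) : Bool :=
  if h : i ≥ w1.length then true
  else
    match PySem.List.pyGet? w1 (i : Int), PySem.List.pyGet? w2 (j : Int) with
    | some item1, some item2 =>
        if item1 ≠ item2 then
          if flag then false
          else loopA w1 w2 i (j + 1) true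
        else loopA w1 w2 (i + 1) (j + 1) flag
    | _, _ => false
termination_by (w1.length - i) + (if flag then 0 else 1)
decreasing_by
  · simp_all
  · simp only [not_le] at h; cases flag <;> simp <;> omega

def check_word1_word2 (word1 : String) (word2 : String) : Bool :=
  let lenth1 : Int := PySem.Str.len word1
  let lenth2 : Int := PySem.Str.len word2
  if lenth2 - lenth1 ≠ 1 then false
  else loopA word1.toList word2.toList 0 0 false

-- ===== PORT B =====
-- while p < n and word1[p] == word2[p]: p += 1   (p < n ≤ len w1 < len w2, so both
-- pyGet? are some; comparing the options is exactly comparing the characters)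
def prefLoop (w1 w2 : List Char) (n p : Nat) : Nat :=
  if h : p < n ∧ PySem.List.pyGet? w1 (p : Int) = PySem.List.pyGet? w2 (p : Int) then
    prefLoop w1 w2 n (p + 1)
  else p
termination_by n - p

-- while s < n and word1[n-1-s] == word2[n-s]: s += 1  (indices as Python ints)
def sufLoop (w1 w2 : List Char) (n s : Nat) : Nat :=
  if h : s < n ∧ PySem.List.pyGet? w1 ((n : Int) - 1 - s) = PySem.List.pyGet? w2 ((n : Int) - s) then
    sufLoop w1 w2 n (s + 1)
  else s
termination_by n - s

def check_word1_word2_alt (word1 : String) (word2 : String) : Bool :=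
  let n : Int := PySem.Str.len word1
  if PySem.Str.len word2 - n ≠ 1 then false
  else
    let p := prefLoop word1.toList word2.toList word1.toList.length 0
    let s := sufLoop word1.toList word2.toList word1.toList.length 0
    decide ((p : Int) + (s : Int) ≥ n)

-- ===== PRECONDITION & SPEC =====
def Spec_check_word1_word2 (word1 : String) (word2 : String) (out : Bool) : Prop := out = check_word1_word2_alt word1 word2
instance (word1 : String) (word2 : String) (out : Bool) : Decidable (Spec_check_word1_word2 word1 word2 out) := by unfold Spec_check_word1_word2; infer_instance

-- ===== CLAIM (what is proved, stated in full; the proofs are below) =====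
def Claim_equal_check_word1_word2 : Prop := ∀ (word1 : String) (word2 : String), Dom_check_word1_word2 word1 word2 → Spec_check_word1_word2 word1 word2 (check_word1_word2 word1 word2)

-- ===== LEMMAS AND PROOFS =====

-- prefLoop characterisation: result r satisfies p0 ≤ r ≤ n, all indices in [p0, r) match,
-- and either r = n or index r mismatches.
theorem prefLoop_spec (w1 w2 : List Char) (n : Nat) :
    ∀ p0, p0 ≤ n →
      p0 ≤ prefLoop w1 w2 n p0 ∧ prefLoop w1 w2 n p0 ≤ n ∧
      (∀ k, p0 ≤ k → k < prefLoop w1 w2 n p0 → w1[k]? = w2[k]?) ∧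
      (prefLoop w1 w2 n p0 = n ∨ ¬ (w1[prefLoop w1 w2 n p0]? = w2[prefLoop w1 w2 n p0]?)) := by
  intro p0 hp0
  generalize hd : n - p0 = d
  induction d generalizing p0 with
  | zero =>
      have hpn : p0 = n := by omega
      rw [prefLoop]
      rw [dif_neg (by omega : ¬ (p0 < n ∧ _))]
      exact ⟨le_refl _, hp0, fun k h1 h2 => by omega, Or.inl hpn⟩
  | succ d ih =>
      rw [prefLoop]
      by_cases hc : p0 < n ∧ PySem.List.pyGet? w1 (p0 : Int) = PySem.List.pyGet? w2 (p0 : Int)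
      · rw [dif_pos hc]
        obtain ⟨r1, r2, r3, r4⟩ := ih (p0 + 1) (by omega) (by omega)
        refine ⟨by omega, r2, ?_, r4⟩
        intro k hk1 hk2
        rcases Nat.eq_or_lt_of_le hk1 with heq | hlt
        · subst heq
          have := hc.2
          simpa [PySem.List.pyGet?_natCast] using this
        · exact r3 k hlt hk2
      · rw [dif_neg hc]
        refine ⟨le_refl _, hp0, fun k h1 h2 => by omega, ?_⟩
        by_cases hlt : p0 < n
        · right
          intro heq
          exact hc ⟨hlt, by simpa [PySem.List.pyGet?_natCast] using heq⟩
        · left; omega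

-- sufLoop characterisation: result r satisfies s0 ≤ r ≤ n, all t in [s0, r) match from the
-- right (w1[n-1-t] = w2[n-t]), and either r = n or position r mismatches.
theorem sufLoop_spec (w1 w2 : List Char) (n : Nat) :
    ∀ s0, s0 ≤ n →
      s0 ≤ sufLoop w1 w2 n s0 ∧ sufLoop w1 w2 n s0 ≤ n ∧
      (∀ t, s0 ≤ t → t < sufLoop w1 w2 n s0 → w1[n - 1 - t]? = w2[n - t]?) ∧
      (sufLoop w1 w2 n s0 = n ∨
        ¬ (w1[n - 1 - sufLoop w1 w2 n s0]? = w2[n - sufLoop w1 w2 n s0]?)) := by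
  intro s0 hs0
  generalize hd : n - s0 = d
  induction d generalizing s0 with
  | zero =>
      have hsn : s0 = n := by omega
      rw [sufLoop, dif_neg (by omega : ¬ (s0 < n ∧ _))]
      exact ⟨le_refl _, hs0, fun t h1 h2 => by omega, Or.inl hsn⟩
  | succ d ih =>
      rw [sufLoop]
      have hidx : ∀ s : Nat, s < n →
          (PySem.List.pyGet? w1 ((n : Int) - 1 - s) = PySem.List.pyGet? w2 ((n : Int) - s)
            ↔ w1[n - 1 - s]? = w2[n - s]?) := by
        intro s hs
        have e1 : (n : Int) - 1 - s = ((n - 1 - s : Nat) : Int) := by omega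
        have e2 : (n : Int) - s = ((n - s : Nat) : Int) := by omega
        rw [e1, e2, PySem.List.pyGet?_natCast, PySem.List.pyGet?_natCast]
      by_cases hc : s0 < n ∧ PySem.List.pyGet? w1 ((n : Int) - 1 - s0) = PySem.List.pyGet? w2 ((n : Int) - s0)
      · rw [dif_pos hc]
        obtain ⟨r1, r2, r3, r4⟩ := ih (s0 + 1) (by omega) (by omega)
        refine ⟨by omega, r2, ?_, r4⟩
        intro t ht1 ht2
        rcases Nat.eq_or_lt_of_le ht1 with heq | hlt
        · subst heq
          exact (hidx s0 hc.1).mp hc.2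
        · exact r3 t hlt ht2
      · rw [dif_neg hc]
        refine ⟨le_refl _, hs0, fun t h1 h2 => by omega, ?_⟩
        by_cases hlt : s0 < n
        · right
          intro heq
          exact hc ⟨hlt, (hidx s0 hlt).mpr heq⟩
        · left; omega

-- A's loop with the flag already set checks that the remaining suffixes are equal.
theorem loopA_flag_true (w1 w2 : List Char) (h2 : w2.length = w1.length + 1) :
    ∀ i, loopA w1 w2 i (i + 1) true = decide (w1.drop i = w2.drop (i + 1)) := by
  intro i
  generalize hd : w1.length - i = d
  induction d generalizing i with
  | zero =>
      rw [loopA, dif_pos (by omega : i ≥ w1.length)]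
      have e1 : w1.drop i = [] := List.drop_eq_nil_of_le (by omega)
      have e2 : w2.drop (i + 1) = [] := List.drop_eq_nil_of_le (by omega)
      simp [e1, e2]
  | succ d ih =>
      have hi : i < w1.length := by omega
      rw [loopA, dif_neg (by omega : ¬ i ≥ w1.length)]
      rw [PySem.List.pyGet?_natCast, PySem.List.pyGet?_natCast]
      rw [List.getElem?_eq_getElem hi, List.getElem?_eq_getElem (by omega : i + 1 < w2.length)]
      have e1 : w1.drop i = w1[i] :: w1.drop (i + 1) := List.drop_eq_getElem_cons hi
      have e2 : w2.drop (i + 1) = w2[i + 1] :: w2.drop (i + 2) := List.drop_eq_getElem_cons (by omega)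
      split
      next a b heq1 heq2 =>
        injection heq1 with ha; injection heq2 with hb
        subst ha; subst hb
        by_cases hne : w1[i] = w2[i + 1]
        · rw [if_neg (by simp [hne]), show i + 1 + 1 = i + 2 from rfl,
            ih (i + 1) (by omega), e1, e2, hne, decide_eq_decide]
          exact ⟨fun h => by rw [h], fun h => (List.cons_eq_cons.mp h).2⟩
        · rw [if_pos hne, if_pos rfl, e1, e2]
          symm
          rw [decide_eq_false_iff_not]
          intro hcc
          exact hne (List.cons_eq_cons.mp hcc).1
      next hno =>
        exact (hno _ _ rfl rfl).elim

-- A's loop with the flag clear advances to the first mismatch p = prefLoop and then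
-- checks w1.drop p = w2.drop (p+1).
theorem loopA_flag_false (w1 w2 : List Char) (h2 : w2.length = w1.length + 1) :
    ∀ i, i ≤ w1.length →
      loopA w1 w2 i i false =
        decide (w1.drop (prefLoop w1 w2 w1.length i) = w2.drop (prefLoop w1 w2 w1.length i + 1)) := by
  intro i hi
  generalize hd : w1.length - i = d
  induction d generalizing i with
  | zero =>
      have hin : i = w1.length := by omega
      rw [loopA, dif_pos (by omega : i ≥ w1.length)]
      rw [prefLoop, dif_neg (by omega : ¬ (i < w1.length ∧ _))]
      have e1 : w1.drop i = [] := List.drop_eq_nil_of_le (by omega)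
      have e2 : w2.drop (i + 1) = [] := List.drop_eq_nil_of_le (by omega)
      simp [e1, e2]
  | succ d ih =>
      have hlt : i < w1.length := by omega
      rw [loopA, dif_neg (by omega : ¬ i ≥ w1.length)]
      rw [PySem.List.pyGet?_natCast, PySem.List.pyGet?_natCast]
      rw [List.getElem?_eq_getElem hlt, List.getElem?_eq_getElem (by omega : i < w2.length)]
      split
      next a b heq1 heq2 =>
        injection heq1 with ha; injection heq2 with hb
        subst ha; subst hb
        by_cases hne : w1[i] = w2[i]
        · rw [if_neg (by simp [hne]), prefLoop, dif_pos ?hc]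
          case hc =>
            refine ⟨hlt, ?_⟩
            rw [PySem.List.pyGet?_natCast, PySem.List.pyGet?_natCast,
              List.getElem?_eq_getElem hlt, List.getElem?_eq_getElem (by omega : i < w2.length)]
            exact congrArg some hne
          exact ih (i + 1) (by omega) (by omega)
        · rw [if_pos hne, if_neg (by simp), prefLoop, dif_neg ?hc]
          case hc =>
            intro hcon
            apply hne
            have := hcon.2
            rw [PySem.List.pyGet?_natCast, PySem.List.pyGet?_natCast,
              List.getElem?_eq_getElem hlt, List.getElem?_eq_getElem (by omega : i < w2.length)] at this
            exact Option.some_injective _ this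
          exact loopA_flag_true w1 w2 h2 i
      next hno =>
        exact (hno _ _ rfl rfl).elim

-- The core equivalence: first-mismatch deletion succeeds iff prefix + suffix cover word1.
theorem drop_eq_iff_pref_suf (w1 w2 : List Char) (h2 : w2.length = w1.length + 1) :
    (w1.drop (prefLoop w1 w2 w1.length 0) = w2.drop (prefLoop w1 w2 w1.length 0 + 1)) ↔
      w1.length ≤ prefLoop w1 w2 w1.length 0 + sufLoop w1 w2 w1.length 0 := by
  set L := w1.length with hL
  obtain ⟨-, hpL, hpM, -⟩ := prefLoop_spec w1 w2 L 0 (by omega)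
  obtain ⟨-, hsL, hsM, hsEnd⟩ := sufLoop_spec w1 w2 L 0 (by omega)
  set p := prefLoop w1 w2 L 0 with hp
  set s := sufLoop w1 w2 L 0 with hs
  constructor
  · intro hdrop
    by_contra hcon
    rw [not_le] at hcon
    have hsn : s ≠ L := by omega
    have hmis := hsEnd.resolve_left hsn
    apply hmis
    -- position s from the right lies inside the matched tail w1.drop p = w2.drop (p+1)
    have hk : p + (L - 1 - s - p) = L - 1 - s := by omega
    have := congrArg (fun l => l[L - 1 - s - p]?) hdrop
    simp only [List.getElem?_drop] at this
    rw [hk] at this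
    have hk2 : p + 1 + (L - 1 - s - p) = L - s := by omega
    rw [hk2] at this
    exact this
  · intro hcov
    apply List.ext_getElem?
    intro m
    simp only [List.getElem?_drop]
    by_cases hin : p + m < L
    · have ht : L - 1 - (p + m) < s := by omega
      have := hsM (L - 1 - (p + m)) (by omega) ht
      have e1 : L - 1 - (L - 1 - (p + m)) = p + m := by omega
      have e2 : L - (L - 1 - (p + m)) = p + m + 1 := by omega
      rw [e1, e2] at this
      have e3 : p + 1 + m = p + m + 1 := by omega
      rw [e3]
      exact this
    · rw [List.getElem?_eq_none (by omega : w1.length ≤ p + m),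
        List.getElem?_eq_none (by omega : w2.length ≤ p + 1 + m)]

-- ===== VERDICT (by name: the statement is the Claim_ definition above) =====
theorem check_word1_word2_spec : Claim_equal_check_word1_word2 := by
  intro word1 word2 _
  unfold Spec_check_word1_word2 check_word1_word2 check_word1_word2_alt
  simp only [PySem.Str.len_eq]
  by_cases hg : (word2.toList.length : Int) - (word1.toList.length : Int) ≠ 1
  · rw [if_pos hg, if_pos hg]
  · rw [if_neg hg, if_neg hg]
    rw [not_not] at hg
    have h2 : word2.toList.length = word1.toList.length + 1 := by omega
    rw [loopA_flag_false word1.toList word2.toList h2 0 (by omega)]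
    have hiff := drop_eq_iff_pref_suf word1.toList word2.toList h2
    by_cases hd : word1.toList.drop (prefLoop word1.toList word2.toList word1.toList.length 0)
        = word2.toList.drop (prefLoop word1.toList word2.toList word1.toList.length 0 + 1)
    · rw [decide_eq_true hd]
      have := hiff.mp hd
      symm
      rw [decide_eq_true_eq]
      omega
    · rw [decide_eq_false hd]
      have : ¬ word1.toList.length ≤ prefLoop word1.toList word2.toList word1.toList.length 0
          + sufLoop word1.toList word2.toList word1.toList.length 0 := fun h => hd (hiff.mpr h)
      symm
      rw [decide_eq_false_iff_not]
      omega
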